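-- pv_equiv track=rewrite | github.com/cspandit/Python-DS-and-Algo | Binary_Search/find_element_in_nearly_sorrted_arr.py | search
-- ===== SOURCE A (Python) =====
-- def search(array, key):
--     low = 0
--     high = len(array) - 1
--     while low <= high:
--         mid = low + (high-low)//2
--         if array[mid] == key:
--             return mid
--         elif mid-1 >= low and array[mid-1] == key:
--             return mid-1
--         elif mid + 1 <= high and array[mid+1] == key:
--             return mid+1
--
--         elif array[mid] > key:
--             high = mid - 2
--         else:
--             low = mid + 2
-- ===== SOURCE B (Python) =====
-- def search(array, key):
--     def probe(low, mid, high):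
--         if array[mid] == key:
--             return mid
--         if mid - 1 >= low and array[mid - 1] == key:
--             return mid - 1
--         if mid + 1 <= high and array[mid + 1] == key:
--             return mid + 1
--         return None
--
--     def go(low, high):
--         if low > high:
--             return None
--         mid = (low + high) // 2
--         hit = probe(low, mid, high)
--         if hit is not None:
--             return hit
--         if array[mid] > key:
--             return go(low, mid - 2)
--         return go(mid + 2, high)
--
--     return go(0, len(array) - 1)
-- ===== Notes on version B (the rewrite author's own statement) =====
-- stated objective: alternative
-- what changed: The iterative while-loop with mutable low/high is re-decomposed as a recursive divide-and-conquer: a separate neighborhood-probe helper checks mid, mid-1, mid+1, and an inner recursive go(low, high) with midpoint (low+high)//2 recurses into the half ranges.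
import Mathlib
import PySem

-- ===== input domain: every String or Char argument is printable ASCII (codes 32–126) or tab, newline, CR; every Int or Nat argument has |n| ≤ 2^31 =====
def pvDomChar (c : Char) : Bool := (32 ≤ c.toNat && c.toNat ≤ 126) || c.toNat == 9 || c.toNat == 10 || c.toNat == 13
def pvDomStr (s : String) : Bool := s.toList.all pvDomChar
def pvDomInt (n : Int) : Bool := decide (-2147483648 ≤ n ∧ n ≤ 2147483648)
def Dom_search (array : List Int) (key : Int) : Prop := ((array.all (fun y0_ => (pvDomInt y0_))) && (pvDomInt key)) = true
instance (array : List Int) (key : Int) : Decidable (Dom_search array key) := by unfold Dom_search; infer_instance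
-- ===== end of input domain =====

-- B re-decomposes A's iterative nearly-sorted binary search as a recursive divide-and-conquer
-- with a separate neighborhood-probe helper; same cost, alternative structure.


-- midpoint bounds, used by the termination proofs of both ports
theorem pvMidBounds (lo hi : Int) (h : lo ≤ hi) :
    lo ≤ lo + PySem.Int.floordiv (hi - lo) 2 ∧ lo + PySem.Int.floordiv (hi - lo) 2 ≤ hi := by
  rw [PySem.Int.floordiv_eq_ediv_of_pos (by omega : (0:Int) < 2)]
  omega

-- ===== PORT A =====
-- the while-loop of A, state (low, high); index accesses via pyGet? (in range on every
-- reachable call; the 'none' branches are the unreachable IndexError cases)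
def searchLoop (array : List Int) (key low high : Int) : Option Int :=
  if _hle : low ≤ high then
    let mid := low + PySem.Int.floordiv (high - low) 2
    if PySem.List.pyGet? array mid = some key then some mid
    else if mid - 1 ≥ low ∧ PySem.List.pyGet? array (mid - 1) = some key then some (mid - 1)
    else if mid + 1 ≤ high ∧ PySem.List.pyGet? array (mid + 1) = some key then some (mid + 1)
    else
      match PySem.List.pyGet? array mid with
      | none => none
      | some v =>
        if v > key then searchLoop array key low (mid - 2)
        else searchLoop array key (mid + 2) high
  else none
termination_by (high - low + 1).toNat
decreasing_by
  · have := pvMidBounds low high _hle; omega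
  · have := pvMidBounds low high _hle; omega

def search (array : List Int) (key : Int) : Option Int :=
  searchLoop array key 0 (array.length - 1)

-- ===== PORT B =====
def probeB (array : List Int) (key low mid high : Int) : Option Int :=
  if PySem.List.pyGet? array mid = some key then some mid
  else if mid - 1 ≥ low ∧ PySem.List.pyGet? array (mid - 1) = some key then some (mid - 1)
  else if mid + 1 ≤ high ∧ PySem.List.pyGet? array (mid + 1) = some key then some (mid + 1)
  else none

def goB (array : List Int) (key low high : Int) : Option Int :=
  if _hgt : low > high then none
  else
    let mid := PySem.Int.floordiv (low + high) 2
    match probeB array key low mid high with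
    | some hit => some hit
    | none =>
      match PySem.List.pyGet? array mid with
      | none => none
      | some v =>
        if v > key then goB array key low (mid - 2)
        else goB array key (mid + 2) high
termination_by (high - low + 1).toNat
decreasing_by
  · have := PySem.Int.floordiv_two_mid_bounds (by omega : low ≤ high); omega
  · have := PySem.Int.floordiv_two_mid_bounds (by omega : low ≤ high); omega

def search_alt (array : List Int) (key : Int) : Option Int :=
  goB array key 0 (array.length - 1)

-- ===== PRECONDITION & SPEC =====
def Spec_search (array : List Int) (key : Int) (out : Option Int) : Prop := out = search_alt array key
instance (array : List Int) (key : Int) (out : Option Int) : Decidable (Spec_search array key out) := by unfold Spec_search; infer_instance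

-- ===== CLAIM (what is proved, stated in full; the proofs are below) =====
def Claim_equal_search : Prop := ∀ (array : List Int) (key : Int), Dom_search array key → Spec_search array key (search array key)

-- ===== LEMMAS AND PROOFS =====

-- the two midpoint formulas agree
theorem pvMidEq (lo hi : Int) :
    PySem.Int.floordiv (lo + hi) 2 = lo + PySem.Int.floordiv (hi - lo) 2 := by
  rw [PySem.Int.floordiv_eq_ediv_of_pos (by omega : (0:Int) < 2),
      PySem.Int.floordiv_eq_ediv_of_pos (by omega : (0:Int) < 2)]
  omega

theorem searchLoop_eq_goB_fuel (array : List Int) (key : Int) :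
    ∀ (n : Nat) (low high : Int), (high - low + 1).toNat ≤ n →
      searchLoop array key low high = goB array key low high := by
  intro n
  induction n with
  | zero =>
      intro low high hn
      rw [searchLoop, goB]
      rw [dif_neg (by omega : ¬ low ≤ high), dif_pos (by omega : low > high)]
  | succ n ih =>
      intro low high hn
      rw [searchLoop, goB]
      by_cases hle : low ≤ high
      · rw [dif_pos hle, dif_neg (by omega : ¬ low > high)]
        simp only [pvMidEq low high, probeB]
        set m := low + PySem.Int.floordiv (high - low) 2 with hm
        have hb : low ≤ m ∧ m ≤ high := pvMidBounds low high hle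
        by_cases h1 : PySem.List.pyGet? array m = some key
        · rw [if_pos h1, if_pos h1]
        rw [if_neg h1, if_neg h1]
        by_cases h2 : m - 1 ≥ low ∧ PySem.List.pyGet? array (m - 1) = some key
        · rw [if_pos h2, if_pos h2]
        rw [if_neg h2, if_neg h2]
        by_cases h3 : m + 1 ≤ high ∧ PySem.List.pyGet? array (m + 1) = some key
        · rw [if_pos h3, if_pos h3]
        rw [if_neg h3, if_neg h3]
        cases h4 : PySem.List.pyGet? array m with
        | none => rfl
        | some v =>
            show (if v > key then searchLoop array key low (m - 2)
                  else searchLoop array key (m + 2) high) =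
                 (if v > key then goB array key low (m - 2)
                  else goB array key (m + 2) high)
            by_cases h5 : v > key
            · rw [if_pos h5, if_pos h5]
              exact ih low (m - 2) (by omega)
            · rw [if_neg h5, if_neg h5]
              exact ih (m + 2) high (by omega)
      · rw [dif_neg hle, dif_pos (by omega : low > high)]

theorem searchLoop_eq_goB (array : List Int) (key : Int) (low high : Int) :
    searchLoop array key low high = goB array key low high :=
  searchLoop_eq_goB_fuel array key (high - low + 1).toNat low high le_rfl

-- ===== VERDICT (by name: the statement is the Claim_ definition above) =====
theorem search_spec : Claim_equal_search := by
  intro array key _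
  unfold Spec_search search search_alt
  exact searchLoop_eq_goB array key 0 (array.length - 1)
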